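-- pv_equiv track=rewrite | github.com/aarnold5/advent-of-code-2024 | day14/day14_puzzle2.py | draw_positions
-- ===== SOURCE A (Python) =====
-- def draw_positions(width, height, robotInfo, midpoint):
--     robotMap = []
--     for y in range(height):
--         robotMap.append([])
--         for x in range(width):
--             count = 0
--             for z in range(len(robotInfo)):
--                 if x == robotInfo[z][0] and y == robotInfo[z][1]:
--                     count += 1
--
--             if count == 0:
--                 robotMap[y].append('.')
--             else:
--                 robotMap[y].append(str(count))
--
--     return robotMap
-- ===== SOURCE B (Python) =====
-- def _cell(counts, x, y):
--     c = counts.get((x, y), 0)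
--     return '.' if c == 0 else str(c)
--
--
-- def draw_positions(width, height, robotInfo, midpoint):
--     counts = {}
--     for r in robotInfo:
--         key = (r[0], r[1])
--         counts[key] = counts.get(key, 0) + 1
--     return [[_cell(counts, x, y) for x in range(width)]
--             for y in range(height)]
-- ===== Notes on version B (the rewrite author's own statement) =====
-- stated objective: faster
-- what changed: Replace the per-cell inner scan of all robots (O(width*height*robots)) by a position-count dict built once, so each grid cell is a single dict lookup.
-- outside the precondition, e.g. on draw_positions(1, 1, [[5]], 0): A returns [['.']], B raises IndexError
import Mathlib
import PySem

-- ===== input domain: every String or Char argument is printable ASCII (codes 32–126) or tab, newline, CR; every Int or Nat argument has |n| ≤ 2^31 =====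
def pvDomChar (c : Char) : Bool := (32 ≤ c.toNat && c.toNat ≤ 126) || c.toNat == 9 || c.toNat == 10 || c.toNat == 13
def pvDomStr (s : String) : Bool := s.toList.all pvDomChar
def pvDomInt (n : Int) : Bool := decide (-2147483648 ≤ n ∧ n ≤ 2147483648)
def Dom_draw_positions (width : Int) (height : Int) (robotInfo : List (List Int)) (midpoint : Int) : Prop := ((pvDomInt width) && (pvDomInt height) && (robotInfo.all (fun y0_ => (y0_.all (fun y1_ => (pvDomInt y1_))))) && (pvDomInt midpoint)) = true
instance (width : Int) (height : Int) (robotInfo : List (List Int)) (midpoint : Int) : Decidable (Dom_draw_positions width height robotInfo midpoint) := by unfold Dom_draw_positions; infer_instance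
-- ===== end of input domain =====

-- B replaces A's per-cell scan of all robots by a position-count dict built once
-- (O(w*h + robots) instead of O(w*h*robots)); return value only, no mutation.

-- ===== PORT A =====
-- per-cell: scan the whole robot list and count matches (robotInfo[z][0]/[1] ported
-- with pyGet?·getD; exact under Pre_, where every row has ≥ 2 entries)
def draw_positions (width : Int) (height : Int) (robotInfo : List (List Int)) (midpoint : Int) : List (List String) :=
  (PySem.List.pyRange 0 height 1).map (fun y =>
    (PySem.List.pyRange 0 width 1).map (fun x =>
      let count : Int := robotInfo.foldl (fun c r =>
        if (PySem.List.pyGet? r 0).getD 0 = x ∧ (PySem.List.pyGet? r 1).getD 0 = y then c + 1 else c) 0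
      if count = 0 then "." else PySem.Int.toStr count))

-- ===== PORT B =====
def cellB (counts : PySem.Dict (Int × Int) Int) (x y : Int) : String :=
  let c := counts.getD (x, y) 0
  if c = 0 then "." else PySem.Int.toStr c

def draw_positions_alt (width : Int) (height : Int) (robotInfo : List (List Int)) (midpoint : Int) : List (List String) :=
  let counts : PySem.Dict (Int × Int) Int :=
    robotInfo.foldl (fun d r =>
      let key := ((PySem.List.pyGet? r 0).getD 0, (PySem.List.pyGet? r 1).getD 0)
      d.insert key (d.getD key 0 + 1)) PySem.Dict.empty
  (PySem.List.pyRange 0 height 1).map (fun y =>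
    (PySem.List.pyRange 0 width 1).map (fun x => cellB counts x y))

-- ===== PRECONDITION & SPEC =====
-- Pre_ excludes robot rows with fewer than 2 entries: on such rows A raises
-- IndexError (or returns only accidentally via `and` short-circuiting / an empty
-- grid), and B itself raises IndexError on them.
def Pre_draw_positions (width : Int) (height : Int) (robotInfo : List (List Int)) (midpoint : Int) : Prop :=
  ∀ r ∈ robotInfo, 2 ≤ r.length

instance (width : Int) (height : Int) (robotInfo : List (List Int)) (midpoint : Int) : Decidable (Pre_draw_positions width height robotInfo midpoint) := by unfold Pre_draw_positions; infer_instance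

def pvWitness_draw_positions : Int × Int × List (List Int) × Int := (3, 2, [[1, 0, 5, 5], [1, 0, -1, 2], [2, 1, 0, 0]], 1)

def Spec_draw_positions (width : Int) (height : Int) (robotInfo : List (List Int)) (midpoint : Int) (out : List (List String)) : Prop := out = draw_positions_alt width height robotInfo midpoint
instance (width : Int) (height : Int) (robotInfo : List (List Int)) (midpoint : Int) (out : List (List String)) : Decidable (Spec_draw_positions width height robotInfo midpoint out) := by unfold Spec_draw_positions; infer_instance

-- ===== CLAIM (what is proved, stated in full; the proofs are below) =====
def Claim_equal_draw_positions : Prop := ∀ (width : Int) (height : Int) (robotInfo : List (List Int)) (midpoint : Int), Dom_draw_positions width height robotInfo midpoint → Pre_draw_positions width height robotInfo midpoint → Spec_draw_positions width height robotInfo midpoint (draw_positions width height robotInfo midpoint)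

-- ===== LEMMAS AND PROOFS =====

-- key of a robot row
def rkey (r : List Int) : Int × Int := ((PySem.List.pyGet? r 0).getD 0, (PySem.List.pyGet? r 1).getD 0)

-- the count dict built by B's loop answers exactly A's per-cell count
theorem getD_foldl_insert_key (l : List (List Int)) (d : PySem.Dict (Int × Int) Int) (p : Int × Int) :
    (l.foldl (fun d r => d.insert (rkey r) (d.getD (rkey r) 0 + 1)) d).getD p 0
      = d.getD p 0 + (l.countP (fun r => rkey r = p)) := by
  induction l generalizing d with
  | nil => simp
  | cons r l ih =>
    simp only [List.foldl_cons, List.countP_cons, ih]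
    by_cases h : rkey r = p
    · subst h
      simp [PySem.Dict.getD_insert_self]
      omega
    · rw [PySem.Dict.getD_insert_of_ne]
      · simp [h]
      · exact fun hc => h hc.symm

theorem count_eq_countP (l : List (List Int)) (x y : Int) :
    l.foldl (fun c r =>
        if (PySem.List.pyGet? r 0).getD 0 = x ∧ (PySem.List.pyGet? r 1).getD 0 = y then c + 1 else c) (0 : Int)
      = l.countP (fun r => rkey r = (x, y)) := by
  have h : ∀ (c : Int), l.foldl (fun c r =>
        if (PySem.List.pyGet? r 0).getD 0 = x ∧ (PySem.List.pyGet? r 1).getD 0 = y then c + 1 else c) c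
      = c + l.countP (fun r => rkey r = (x, y)) := by
    induction l with
    | nil => simp
    | cons r l ih =>
      intro c
      simp only [List.foldl_cons, List.countP_cons, ih]
      by_cases hc : (PySem.List.pyGet? r 0).getD 0 = x ∧ (PySem.List.pyGet? r 1).getD 0 = y
      · have : rkey r = (x, y) := by simp [rkey, hc.1, hc.2]
        simp [hc, this]; omega
      · have : ¬ (rkey r = (x, y)) := by
          simp only [rkey, Prod.mk.injEq]
          exact fun h' => hc h'
        simp [hc, this]
  simpa using h 0

theorem draw_positions_spec : Claim_equal_draw_positions := by
  intro width height robotInfo midpoint _ _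
  unfold Spec_draw_positions draw_positions draw_positions_alt
  apply List.map_congr_left
  intro y _
  apply List.map_congr_left
  intro x _
  simp only [cellB]
  have hc : robotInfo.foldl (fun c r =>
        if (PySem.List.pyGet? r 0).getD 0 = x ∧ (PySem.List.pyGet? r 1).getD 0 = y then c + 1 else c) (0 : Int)
      = (robotInfo.foldl (fun d r =>
          let key := ((PySem.List.pyGet? r 0).getD 0, (PySem.List.pyGet? r 1).getD 0)
          d.insert key (d.getD key 0 + 1)) PySem.Dict.empty).getD (x, y) 0 := by
    have h1 := getD_foldl_insert_key robotInfo PySem.Dict.empty (x, y)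
    have h2 := count_eq_countP robotInfo x y
    simp only [rkey] at h1 h2 ⊢
    rw [h2, h1]
    simp
  rw [hc]
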